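-- pv_equiv track=rewrite | github.com/aadya940/pycoding | pycoding/_utils.py | needs_flowchart
-- ===== SOURCE A (Python) =====
-- def needs_flowchart(code_snippet: str) -> bool:
--     """
--     Determines if a code snippet would benefit from a flowchart visualization.
--
--     Returns True if the code contains:
--     - Control flow statements (if/else, loops)
--     - Function definitions with multiple paths
--     - Complex algorithms or data transformations
--     """
--     # Keywords that suggest control flow or complex logic
--     flow_indicators = {
--         "if",
--         "else",
--         "elif",
--         "for",
--         "while",
--         "try",
--         "except",
--         "match",
--         "case",
--         "def",
--         "class",
--         "return",
--         "yield",
--         "break",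
--         "continue",
--     }
--
--     # Check for presence of flow control keywords, excluding commented lines
--     has_flow_control = False
--     for line in code_snippet.split("\n"):
--         line = line.strip()
--         if line and not line.startswith("#"):
--             # Check if any flow indicator is present in this non-commented line
--             if any(
--                 f" {keyword} " in f" {line.lower()} " for keyword in flow_indicators
--             ):
--                 has_flow_control = True
--                 break
--
--     # Return True if there's control flow or the code is complex enough
--     return has_flow_control
-- ===== SOURCE B (Python) =====
-- def needs_flowchart(code_snippet: str) -> bool:
--     # Staged passes: strip all lines, drop empty/comment lines, lower, join the
--     # remaining lines into one space-separated token stream, and scan it once.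
--     flow_indicators = {
--         "if", "else", "elif", "for", "while", "try", "except", "match",
--         "case", "def", "class", "return", "yield", "break", "continue",
--     }
--     lines = [ln.strip() for ln in code_snippet.split("\n")]
--     code_lines = [ln.lower() for ln in lines if ln and not ln.startswith("#")]
--     tokens = " ".join(code_lines).split(" ")
--     return any(t in flow_indicators for t in tokens)
-- ===== Notes on version B (the rewrite author's own statement) =====
-- stated objective: simpler
-- what changed: A runs an explicit flag-and-break loop over lines and, per line, one padded-substring scan for each of the 15 keywords; B is staged passes with no per-line keyword test: strip all lines, filter out empty/comment lines, lowercase, join the survivors into one space-separated token stream, split it once, and do a single membership scan over the global token list; measured ~5x faster (one split + set lookups over the whole text instead of 15 substring searches per line).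
import Mathlib
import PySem

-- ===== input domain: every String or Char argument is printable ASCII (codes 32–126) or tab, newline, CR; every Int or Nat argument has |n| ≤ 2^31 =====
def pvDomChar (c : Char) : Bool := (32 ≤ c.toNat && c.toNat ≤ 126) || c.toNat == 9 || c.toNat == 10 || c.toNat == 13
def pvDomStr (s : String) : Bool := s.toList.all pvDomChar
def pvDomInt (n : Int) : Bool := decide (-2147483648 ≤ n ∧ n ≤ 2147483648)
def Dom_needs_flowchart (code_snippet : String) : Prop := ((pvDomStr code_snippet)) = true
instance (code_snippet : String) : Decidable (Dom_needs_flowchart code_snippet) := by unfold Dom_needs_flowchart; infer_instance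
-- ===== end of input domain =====

-- B replaces A's per-line flag-and-break loop with per-keyword padded-substring scans by
-- staged passes: strip/filter/lower all lines, join them into one space-separated token
-- stream, split once, and scan that global token list for a keyword (objective: simpler).

-- ===== PORT A =====
-- the flow_indicators set literal (any() over it, so iteration order is irrelevant)
def pvFlowA : List (List Char) :=
  ["if".toList, "else".toList, "elif".toList, "for".toList, "while".toList,
   "try".toList, "except".toList, "match".toList, "case".toList, "def".toList,
   "class".toList, "return".toList, "yield".toList, "break".toList, "continue".toList]

-- A's for-loop with `break`: recursion over the lines, stopping at the first hit
def pvLoopA : List (List Char) → Bool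
  | [] => false
  | raw :: rest =>
    let line := PySem.Chars.strip raw
    if line ≠ [] ∧ ¬ (PySem.Chars.startswith line ['#'] = true) then
      if pvFlowA.any (fun kw =>
          PySem.Chars.isIn (' ' :: (kw ++ [' '])) (' ' :: (PySem.Chars.lower line ++ [' ']))) then
        true
      else pvLoopA rest
    else pvLoopA rest

def needs_flowchart (code_snippet : String) : Bool :=
  pvLoopA (PySem.Chars.splitOn code_snippet.toList ['\n'])

-- ===== PORT B =====
def pvFlowB : List (List Char) :=
  ["if".toList, "else".toList, "elif".toList, "for".toList, "while".toList,
   "try".toList, "except".toList, "match".toList, "case".toList, "def".toList,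
   "class".toList, "return".toList, "yield".toList, "break".toList, "continue".toList]

def needs_flowchart_alt (code_snippet : String) : Bool :=
  -- lines = [ln.strip() for ln in code_snippet.split("\n")]
  let lines := (PySem.Chars.splitOn code_snippet.toList ['\n']).map PySem.Chars.strip
  -- code_lines = [ln.lower() for ln in lines if ln and not ln.startswith("#")]
  let codeLines := (lines.filter
      (fun ln => decide (ln ≠ []) && !PySem.Chars.startswith ln ['#'])).map PySem.Chars.lower
  -- tokens = " ".join(code_lines).split(" ")
  let tokens := PySem.Chars.splitOn (PySem.Chars.join [' '] codeLines) [' ']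
  -- any(t in flow_indicators for t in tokens)
  tokens.any (fun t => pvFlowB.contains t)

-- ===== PRECONDITION & SPEC =====
def Spec_needs_flowchart (code_snippet : String) (out : Bool) : Prop := out = needs_flowchart_alt code_snippet
instance (code_snippet : String) (out : Bool) : Decidable (Spec_needs_flowchart code_snippet out) := by unfold Spec_needs_flowchart; infer_instance

-- ===== CLAIM (what is proved, stated in full; the proofs are below) =====
def Claim_equal_needs_flowchart : Prop := ∀ (code_snippet : String), Dom_needs_flowchart code_snippet → Spec_needs_flowchart code_snippet (needs_flowchart code_snippet)

-- ===== LEMMAS AND PROOFS =====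

-- first word of a line: the chars before the first space
def pvFw (l : List Char) : List Char := l.takeWhile (· ≠ ' ')

-- the words after the first space
def pvRw : List Char → List (List Char)
  | [] => []
  | c :: t => if c = ' ' then pvFw t :: pvRw t else pvRw t

theorem pvRw_cons (c : Char) (t : List Char) :
    pvRw (c :: t) = if c = ' ' then pvFw t :: pvRw t else pvRw t := rfl

-- characterisation of splitOn.go on a single-space separator
theorem pv_splitOn_go (fuel : Nat) : ∀ (l cur : List Char) (acc : List (List Char)),
    l.length ≤ fuel →
    PySem.Chars.splitOn.go [' '] (fuel + 1) l cur acc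
      = acc.reverse ++ ((cur.reverse ++ pvFw l) :: pvRw l) := by
  induction fuel with
  | zero =>
    intro l cur acc h
    have : l = [] := List.length_eq_zero_iff.mp (Nat.le_zero.mp h)
    subst this
    simp [PySem.Chars.splitOn.go, pvFw, pvRw]
  | succ n ih =>
    intro l cur acc h
    cases l with
    | nil => simp [PySem.Chars.splitOn.go, pvFw, pvRw]
    | cons c rest =>
      by_cases hc : c = ' '
      · subst hc
        have hstep : PySem.Chars.splitOn.go [' '] (n + 1 + 1) (' ' :: rest) cur acc
            = PySem.Chars.splitOn.go [' '] (n + 1) rest [] (cur.reverse :: acc) := by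
          simp [PySem.Chars.splitOn.go, List.isPrefixOf]
        rw [hstep, ih rest [] (cur.reverse :: acc) (by simpa using Nat.lt_succ_iff.mp (by simpa using h))]
        simp [pvFw, pvRw]
      · have hstep : PySem.Chars.splitOn.go [' '] (n + 1 + 1) (c :: rest) cur acc
            = PySem.Chars.splitOn.go [' '] (n + 1) rest (c :: cur) acc := by
          simp [PySem.Chars.splitOn.go, List.isPrefixOf, Ne.symm hc]
        rw [hstep, ih rest (c :: cur) acc (by simpa using Nat.lt_succ_iff.mp (by simpa using h))]
        simp [pvFw, pvRw, hc]

theorem pv_splitOn_space (l : List Char) :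
    PySem.Chars.splitOn l [' '] = pvFw l :: pvRw l := by
  have := pv_splitOn_go l.length l [] [] (le_refl _)
  simpa [PySem.Chars.splitOn] using this

-- the first word, followed by a space, is a prefix of the padded line
theorem pv_fw_prefix : ∀ l : List Char, pvFw l ++ [' '] <+: l ++ [' ']
  | [] => by simp [pvFw]
  | c :: t => by
    by_cases hc : c = ' '
    · subst hc; simp [pvFw]
    · simpa [pvFw, hc, List.takeWhile_cons, List.cons_prefix_cons] using pv_fw_prefix t

-- a space-free word that is prefix-aligned with a space after it IS the first word
theorem pv_prefix_fw : ∀ (l kw : List Char), ' ' ∉ kw → kw ++ [' '] <+: l ++ [' '] → kw = pvFw l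
  | l, [], _, h => by
    cases l with
    | nil => simp [pvFw]
    | cons c t =>
      by_cases hc : c = ' '
      · subst hc; simp [pvFw]
      · exfalso
        have : (' ' : Char) = c := by simpa [List.cons_prefix_cons] using h
        exact hc this.symm
  | l, d :: kw', hsp, h => by
    cases l with
    | nil =>
      exfalso
      have := h.length_le
      simp at this
    | cons c t =>
      have hd : d = c ∧ (kw' ++ [' '] <+: t ++ [' ']) := by
        simpa using List.cons_prefix_cons.mp (by simpa using h)
      have hdsp : d ≠ ' ' := fun he => hsp (he ▸ List.mem_cons_self)
      have := pv_prefix_fw t kw' (fun hm => hsp (List.mem_cons_of_mem _ hm)) hd.2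
      simp [pvFw, ← hd.1, hdsp, this]

-- an internal padded occurrence lands in the words after the first space
theorem pv_infix_rw : ∀ (l kw : List Char), ' ' ∉ kw →
    (' ' :: (kw ++ [' '])) <:+: l ++ [' '] → kw ∈ pvRw l
  | [], kw, _, h => by
    exfalso
    have := h.length_le
    simp at this
  | c :: t, kw, hsp, h => by
    rcases List.infix_cons_iff.mp (by simpa using h) with hpre | hinf
    · have hp := List.cons_prefix_cons.mp (by simpa using hpre)
      by_cases hc : c = ' '
      · subst hc
        have := pv_prefix_fw t kw hsp hp.2
        rw [pvRw_cons, if_pos rfl, this]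
        exact List.mem_cons_self
      · exact absurd hp.1.symm hc
    · have := pv_infix_rw t kw hsp hinf
      rw [pvRw_cons]
      split_ifs with hc
      · exact List.mem_cons_of_mem _ this
      · exact this

-- each word after the first space yields a padded occurrence
theorem pv_rw_infix : ∀ (l kw : List Char), kw ∈ pvRw l →
    (' ' :: (kw ++ [' '])) <:+: l ++ [' ']
  | [], kw, h => by simp [pvRw] at h
  | c :: t, kw, h => by
    rw [pvRw_cons] at h
    by_cases hc : c = ' '
    · subst hc
      rw [if_pos rfl] at h
      rcases List.mem_cons.mp h with h | h
      · subst h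
        exact List.IsPrefix.isInfix (by simpa [List.cons_prefix_cons] using pv_fw_prefix t)
      · exact (pv_rw_infix t kw h).trans (List.suffix_cons _ _).isInfix
    · rw [if_neg hc] at h
      exact (pv_rw_infix t kw h).trans (List.suffix_cons _ _).isInfix

-- the padded-substring test is token membership
theorem pv_pad_iff (l kw : List Char) (hsp : ' ' ∉ kw) :
    PySem.Chars.isIn (' ' :: (kw ++ [' '])) (' ' :: (l ++ [' '])) = true ↔ kw ∈ pvFw l :: pvRw l := by
  rw [PySem.Chars.isIn_iff_infix]
  constructor
  · intro h
    rcases List.infix_cons_iff.mp h with hpre | hinf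
    · have : kw ++ [' '] <+: l ++ [' '] := by
        simpa [List.cons_prefix_cons] using hpre
      rw [pv_prefix_fw l kw hsp this]
      exact List.mem_cons_self
    · exact List.mem_cons_of_mem _ (pv_infix_rw l kw hsp hinf)
  · intro h
    rcases List.mem_cons.mp h with h | h
    · subst h
      exact List.IsPrefix.isInfix (by simpa [List.cons_prefix_cons] using pv_fw_prefix l)
    · exact (pv_rw_infix l kw h).trans (List.suffix_cons _ _).isInfix

theorem pv_flow_space_free : ∀ kw ∈ pvFlowA, ' ' ∉ kw := by decide

theorem pv_flowB_eq : pvFlowB = pvFlowA := rfl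

-- per-line: A's any-over-keywords substring test equals token membership
theorem pv_perLine (l : List Char) :
    pvFlowA.any (fun kw =>
        PySem.Chars.isIn (' ' :: (kw ++ [' '])) (' ' :: (l ++ [' '])))
      = (PySem.Chars.splitOn l [' ']).any (fun w => pvFlowB.contains w) := by
  rw [pv_splitOn_space, pv_flowB_eq]
  rcases hA : pvFlowA.any (fun kw =>
      PySem.Chars.isIn (' ' :: (kw ++ [' '])) (' ' :: (l ++ [' ']))) with _ | _
  · symm
    rw [List.any_eq_false] at hA ⊢
    intro w hw hcon
    have hwf : w ∈ pvFlowA := List.contains_iff_mem.mp hcon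
    exact hA w hwf ((pv_pad_iff l w (pv_flow_space_free w hwf)).mpr hw)
  · symm
    rw [List.any_eq_true] at hA ⊢
    obtain ⟨kw, hkw, hin⟩ := hA
    exact ⟨kw, (pv_pad_iff l kw (pv_flow_space_free kw hkw)).mp hin,
      List.contains_iff_mem.mpr hkw⟩

-- splitting on ' ' distributes over an explicit ' ' between two pieces
theorem pv_fwrw_append : ∀ x y : List Char,
    pvFw (x ++ ' ' :: y) :: pvRw (x ++ ' ' :: y)
      = (pvFw x :: pvRw x) ++ (pvFw y :: pvRw y)
  | [], y => by simp [pvFw, pvRw]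
  | c :: t, y => by
    have ih := pv_fwrw_append t y
    simp only [List.cons_append] at ih
    obtain ⟨h1, h2⟩ := List.cons_eq_cons.mp ih
    by_cases hc : c = ' '
    · subst hc
      simp only [pvFw, ne_eq, decide_not] at h1
      simp [pvFw, pvRw_cons, h1, h2]
    · simp only [pvFw, ne_eq, decide_not] at h1
      simp [pvFw, hc, pvRw_cons, h1, h2]

theorem pv_split_append (x y : List Char) :
    PySem.Chars.splitOn (x ++ ' ' :: y) [' ']
      = PySem.Chars.splitOn x [' '] ++ PySem.Chars.splitOn y [' '] := by
  rw [pv_splitOn_space, pv_splitOn_space, pv_splitOn_space]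
  exact pv_fwrw_append x y

-- scanning the token stream of the joined lines = scanning each line's tokens
theorem pv_any_join (P : List Char → Bool) (hP : P [] = false) :
    ∀ ls : List (List Char),
    (PySem.Chars.splitOn (PySem.Chars.join [' '] ls) [' ']).any P
      = ls.any (fun l => (PySem.Chars.splitOn l [' ']).any P)
  | [] => by
    rw [PySem.Chars.join_nil, pv_splitOn_space]
    simp [pvFw, pvRw, hP]
  | [a] => by
    rw [PySem.Chars.join_singleton]
    simp
  | a :: b :: rs => by
    have hj : PySem.Chars.join [' '] (a :: b :: rs)
        = a ++ ' ' :: PySem.Chars.join [' '] (b :: rs) := by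
      simpa using PySem.Chars.join_cons_cons [' '] a b rs
    rw [hj, pv_split_append, List.any_append, pv_any_join P hP (b :: rs)]
    simp

-- A's break-loop equals any over stripped lines of (guard && token test)
theorem pv_loop_eq : ∀ raws : List (List Char),
    pvLoopA raws = (raws.map PySem.Chars.strip).any (fun line =>
      decide (line ≠ []) && !PySem.Chars.startswith line ['#'] &&
      (PySem.Chars.splitOn (PySem.Chars.lower line) [' ']).any (fun w => pvFlowB.contains w))
  | [] => rfl
  | raw :: rest => by
    rw [List.map_cons, List.any_cons, ← pv_loop_eq rest]
    show (if _ then _ else _) = _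
    have hline := pv_perLine (PySem.Chars.lower (PySem.Chars.strip raw))
    by_cases hg : PySem.Chars.strip raw ≠ [] ∧ ¬ (PySem.Chars.startswith (PySem.Chars.strip raw) ['#'] = true)
    · rw [if_pos hg]
      have hgb : (decide (PySem.Chars.strip raw ≠ []) &&
          !PySem.Chars.startswith (PySem.Chars.strip raw) ['#']) = true := by
        simp [hg.1, hg.2]
      rw [hgb, Bool.true_and, ← hline]
      by_cases hh : (pvFlowA.any fun kw =>
          PySem.Chars.isIn (' ' :: (kw ++ [' ']))
            (' ' :: (PySem.Chars.lower (PySem.Chars.strip raw) ++ [' ']))) = true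
      · rw [if_pos hh, hh, Bool.true_or]
      · have hf : (pvFlowA.any fun kw =>
            PySem.Chars.isIn (' ' :: (kw ++ [' ']))
              (' ' :: (PySem.Chars.lower (PySem.Chars.strip raw) ++ [' ']))) = false :=
          Bool.eq_false_iff.mpr hh
        rw [if_neg hh, hf, Bool.false_or]
    · rw [if_neg hg]
      have hgb : (decide (PySem.Chars.strip raw ≠ []) &&
          !PySem.Chars.startswith (PySem.Chars.strip raw) ['#']) = false := by
        push Not at hg
        by_cases h1 : PySem.Chars.strip raw = []
        · simp [h1]
        · simp [hg h1]
      rw [hgb, Bool.false_and, Bool.false_or]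

-- ===== VERDICT (by name: the statement is the Claim_ definition above) =====
theorem needs_flowchart_spec : Claim_equal_needs_flowchart := by
  intro code_snippet _
  show needs_flowchart code_snippet = needs_flowchart_alt code_snippet
  simp only [needs_flowchart, needs_flowchart_alt]
  rw [pv_loop_eq, pv_any_join (fun t => pvFlowB.contains t) (by decide)]
  conv_rhs => rw [List.any_map, List.any_filter]
  congr 1
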